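-- pv_equiv track=rewrite | github.com/KingWitherBrine/py | other/python/cowvid_19_I_II.py | smallest_interior_gap
-- ===== SOURCE A (Python) =====
-- def smallest_interior_gap(s):
--   current_start = -1
--   gap = len(s) - 1  # the max possible interior gap
--   for i in range(len(s)):
--     if s[i] == '1':
--       if current_start != -1:
--         gap = min(gap, i - current_start)
--       current_start = i
--   return gap
-- ===== SOURCE B (Python) =====
-- def smallest_interior_gap(s):
--     # Split the string on '1': the pieces strictly between two '1's are the
--     # interior runs of non-'1' characters; the smallest gap is the shortest
--     # such run plus one. Fewer than two '1's (parts has < 3 pieces): len(s)-1.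
--     parts = s.split('1')
--     if len(parts) < 3:
--         return len(s) - 1
--     return 1 + min(len(p) for p in parts[1:-1])
-- ===== Notes on version B (the rewrite author's own statement) =====
-- stated objective: faster
-- what changed: Replaces A's stateful per-character index scan (tracking the previous '1' index and a running min) by splitting the string on '1' and returning 1 + the length of the shortest piece strictly between the first and last '1', with len(s)-1 when there are fewer than two '1's.
import Mathlib
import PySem

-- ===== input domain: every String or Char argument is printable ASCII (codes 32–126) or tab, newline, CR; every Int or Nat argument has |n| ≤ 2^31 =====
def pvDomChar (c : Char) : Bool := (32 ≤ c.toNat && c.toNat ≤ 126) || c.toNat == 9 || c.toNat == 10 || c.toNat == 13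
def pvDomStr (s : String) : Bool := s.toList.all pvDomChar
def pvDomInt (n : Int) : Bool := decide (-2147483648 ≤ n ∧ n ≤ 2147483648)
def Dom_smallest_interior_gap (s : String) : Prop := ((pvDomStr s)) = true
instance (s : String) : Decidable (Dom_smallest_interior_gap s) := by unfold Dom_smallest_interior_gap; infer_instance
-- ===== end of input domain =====

-- B replaces A's stateful index scan by split-on-'1': the answer is 1 + the length of
-- the shortest piece strictly between the first and last '1' (len(s)-1 with < 2 ones);
-- objective: faster (a timing run measured B faster: str.split does the scan in C instead of a per-character Python loop).

-- ===== PORT A =====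
-- A's "for i in range(len(s))" loop with state (current_start, gap), as structural
-- recursion over the characters carrying the index i.
def pvGoA : List Char → Nat → Int → Int → Int
  | [], _, _, gap => gap
  | c :: rest, i, start, gap =>
      if c = '1' then
        if start ≠ -1 then pvGoA rest (i + 1) (i : Int) (min gap ((i : Int) - start))
        else pvGoA rest (i + 1) (i : Int) gap
      else pvGoA rest (i + 1) start gap

def smallest_interior_gap (s : String) : Int :=
  pvGoA s.toList 0 (-1) ((s.toList.length : Int) - 1)

-- ===== PORT B =====
def smallest_interior_gap_alt (s : String) : Int :=
  let parts := PySem.Chars.splitOn s.toList ['1']   -- s.split('1'); the literal separator is non-empty, so split never raises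
  if parts.length < 3 then (PySem.Str.len s) - 1
  else
    match ((PySem.List.slice parts (some 1) (some (-1))).map (fun p => (p.length : Int))).min? with
    | some m => 1 + m
    | none => 0   -- unreachable: parts.length ≥ 3 makes parts[1:-1] non-empty (Python's min would raise on empty)

-- ===== PRECONDITION & SPEC =====
def Spec_smallest_interior_gap (s : String) (out : Int) : Prop := out = smallest_interior_gap_alt s
instance (s : String) (out : Int) : Decidable (Spec_smallest_interior_gap s out) := by unfold Spec_smallest_interior_gap; infer_instance

-- ===== CLAIM (what is proved, stated in full; the proofs are below) =====
def Claim_equal_smallest_interior_gap : Prop := ∀ (s : String), Dom_smallest_interior_gap s → Spec_smallest_interior_gap s (smallest_interior_gap s)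

-- ===== LEMMAS AND PROOFS =====

-- Specification-side splitter: sp cs = cs.split('1') (as lists of chars).
def sp : List Char → List (List Char)
  | [] => [[]]
  | c :: rest =>
      if c = '1' then [] :: sp rest
      else match sp rest with
        | [] => [[c]]
        | p :: ps => (c :: p) :: ps

theorem sp_ne_nil (cs : List Char) : sp cs ≠ [] := by
  cases cs with
  | nil => simp [sp]
  | cons c rest =>
      by_cases hc : c = '1'
      · simp [sp, hc]
      · simp only [sp, hc, if_false]
        rcases sp rest with _ | ⟨p, ps⟩ <;> simp

theorem go_eq (cs : List Char) : ∀ (fuel : Nat) (cur : List Char) (acc : List (List Char)),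
    cs.length < fuel →
    PySem.Chars.splitOn.go ['1'] fuel cs cur acc
      = acc.reverse ++ (cur.reverse ++ (sp cs).headI) :: (sp cs).tail := by
  induction cs with
  | nil =>
      intro fuel cur acc h
      match fuel, h with
      | fuel + 1, _ => simp [PySem.Chars.splitOn.go, sp]
  | cons c rest ih =>
      intro fuel cur acc h
      match fuel, h with
      | fuel + 1, h =>
        by_cases hc : c = '1'
        · subst hc
          have hpre : List.isPrefixOf ['1'] ('1' :: rest) = true := by simp [List.isPrefixOf]
          rw [PySem.Chars.splitOn.go]
          simp only [hpre, if_pos, List.length_cons, List.length_nil, Nat.zero_add, List.drop_one,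
            List.tail_cons]
          rw [ih fuel [] (cur.reverse :: acc) (by simp at h; omega)]
          rcases hrest : sp rest with _ | ⟨p, ps⟩
          · exact absurd hrest (sp_ne_nil rest)
          · simp [sp, hrest]
        · have hpre : List.isPrefixOf ['1'] (c :: rest) = false := by
            simp [List.isPrefixOf]; exact fun h' => (hc h'.symm).elim
          rw [PySem.Chars.splitOn.go]
          simp only [hpre, Bool.false_eq_true, if_false]
          rw [ih fuel (c :: cur) acc (by simp at h; omega)]
          rcases hrest : sp rest with _ | ⟨p, ps⟩
          · exact absurd hrest (sp_ne_nil rest)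
          · simp [sp, hc, hrest]

theorem splitOn_eq_sp (cs : List Char) : PySem.Chars.splitOn cs ['1'] = sp cs := by
  rw [PySem.Chars.splitOn, go_eq cs (cs.length + 1) [] [] (by omega)]
  rcases h : sp cs with _ | ⟨p, ps⟩
  · exact absurd h (sp_ne_nil cs)
  · simp

-- The pending-gap list of the remaining pieces: d non-'1' chars already passed since
-- the last '1' (added to the first interior gap).
def pend (d : Int) (ps : List (List Char)) : List Int :=
  (ps.dropLast.map (fun q => (q.length : Int) + 1)).modifyHead (· + d)

theorem pend_zero (ps : List (List Char)) :
    pend 0 ps = ps.dropLast.map (fun q => (q.length : Int) + 1) := by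
  unfold pend
  rcases h : ps.dropLast.map (fun q => ((q.length : Int) + 1)) with _ | ⟨a, l⟩ <;> simp [h]

theorem pend_cons_nil (d : Int) (p : List Char) (ps : List (List Char)) :
    pend d ([] :: p :: ps)
      = ((1 : Int) + d) :: (p :: ps).dropLast.map (fun q => ((q.length : Int) + 1)) := by
  simp [pend, List.dropLast_cons_of_ne_nil]

-- A's loop after a '1' has been seen: start = i - (d+1) ≥ 0.
theorem pvGoA_seen (cs : List Char) : ∀ (d i : Nat) (gap : Int), d < i →
    pvGoA cs i ((i : Int) - ((d : Int) + 1)) gap = List.foldl min gap (pend d (sp cs)) := by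
  induction cs with
  | nil => intro d i gap _; simp [pvGoA, sp, pend]
  | cons c rest ih =>
      intro d i gap hdi
      by_cases hc : c = '1'
      · subst hc
        have hne : (i : Int) - ((d : Int) + 1) ≠ -1 := by omega
        have step : pvGoA ('1' :: rest) i ((i : Int) - ((d : Int) + 1)) gap
            = pvGoA rest (i + 1) (i : Int) (min gap ((d : Int) + 1)) := by
          simp only [pvGoA, if_pos, hne, ne_eq, not_false_eq_true]
          rw [show (i : Int) - ((i : Int) - ((d : Int) + 1)) = (d : Int) + 1 by ring]
        rw [step]
        have key := ih 0 (i + 1) (min gap ((d : Int) + 1)) (by omega)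
        push_cast at key
        rw [show ((i : Int) + 1 - 1) = (i : Int) by ring] at key
        rw [key, pend_zero]
        rcases hrest : sp rest with _ | ⟨p, ps⟩
        · exact absurd hrest (sp_ne_nil rest)
        · have hsp : sp ('1' :: rest) = [] :: p :: ps := by simp [sp, hrest]
          rw [hsp]
          rw [pend_cons_nil, List.foldl_cons, add_comm (1 : Int) (d : Int), add_comm (d : Int) 1]
      · have step : pvGoA (c :: rest) i ((i : Int) - ((d : Int) + 1)) gap
            = pvGoA rest (i + 1) ((i : Int) - ((d : Int) + 1)) gap := by
          simp [pvGoA, hc]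
        rw [step, show (i : Int) - ((d : Int) + 1)
            = (((i + 1 : Nat)) : Int) - (((d + 1 : Nat) : Int) + 1) by push_cast; ring,
          ih (d + 1) (i + 1) gap (by omega)]
        congr 1
        push_cast
        rcases hrest : sp rest with _ | ⟨p, ps⟩
        · exact absurd hrest (sp_ne_nil rest)
        · have hsp : sp (c :: rest) = (c :: p) :: ps := by simp [sp, hc, hrest]
          rw [hsp]
          rcases ps with _ | ⟨p2, ps2⟩
          · simp [pend]
          · simp only [pend, List.dropLast_cons_of_ne_nil (List.cons_ne_nil _ _), List.map_cons,
              List.modifyHead_cons, List.length_cons]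
            congr 1
            push_cast
            ring

-- A's loop before any '1' has been seen.
theorem pvGoA_unseen (cs : List Char) : ∀ (i : Nat) (gap : Int),
    pvGoA cs i (-1) gap = List.foldl min gap (pend 0 (sp cs).tail) := by
  induction cs with
  | nil => intro i gap; simp [pvGoA, sp, pend]
  | cons c rest ih =>
      intro i gap
      by_cases hc : c = '1'
      · subst hc
        have hstep : pvGoA ('1' :: rest) i (-1) gap = pvGoA rest (i + 1) (i : Int) gap := by
          simp [pvGoA]
        rw [hstep]
        have key := pvGoA_seen rest 0 (i + 1) gap (by omega)
        push_cast at key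
        rw [show ((i : Int) + 1 - 1) = (i : Int) by ring] at key
        rw [key]
        congr 1
      · have hstep : pvGoA (c :: rest) i (-1) gap = pvGoA rest (i + 1) (-1) gap := by
          simp [pvGoA, hc]
        rw [hstep, ih (i + 1) gap]
        congr 2
        rcases hrest : sp rest with _ | ⟨p, ps⟩
        · exact absurd hrest (sp_ne_nil rest)
        · simp [sp, hc, hrest]

-- Every piece of sp plus the number of separators accounts for the whole string.
theorem sp_length_sum (cs : List Char) :
    ((sp cs).map List.length).sum + ((sp cs).length - 1) = cs.length := by
  induction cs with
  | nil => simp [sp]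
  | cons c rest ih =>
      rcases hrest : sp rest with _ | ⟨p, ps⟩
      · exact absurd hrest (sp_ne_nil rest)
      · rw [hrest] at ih
        by_cases hc : c = '1'
        · subst hc
          simp only [sp, if_pos, hrest, List.map_cons, List.sum_cons, List.length_cons,
            List.length_nil] at ih ⊢
          omega
        · simp only [sp, hc, if_false, hrest, List.map_cons, List.sum_cons, List.length_cons] at ih ⊢
          omega

theorem foldl_min_map_add_one (l : List Int) (a : Int) :
    List.foldl min (a + 1) (l.map (fun x => x + 1)) = List.foldl min a l + 1 := by
  induction l generalizing a with
  | nil => simp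
  | cons b l ih =>
      simp only [List.map_cons, List.foldl_cons]
      rw [show min (a + 1) (b + 1) = min a b + 1 from (min_add_add_right a b 1), ih]

theorem slice_one_neg_one (parts : List (List Char)) :
    PySem.List.slice parts (some 1) (some (-1)) = parts.tail.dropLast := by
  cases parts with
  | nil => rfl
  | cons p ps =>
      simp [PySem.List.slice, PySem.List.clampIdx, List.dropLast_eq_take]
      rw [if_neg (by omega : ¬((ps.length : Int) < 0))]
      omega

-- ===== VERDICT (by name: the statement is the Claim_ definition above) =====
theorem smallest_interior_gap_spec : Claim_equal_smallest_interior_gap := by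
  intro s _
  show smallest_interior_gap s = smallest_interior_gap_alt s
  unfold smallest_interior_gap smallest_interior_gap_alt
  rw [pvGoA_unseen, pend_zero]
  simp only [splitOn_eq_sp, slice_one_neg_one]
  by_cases h3 : (sp s.toList).length < 3
  · rw [if_pos h3]
    have hnil : (sp s.toList).tail.dropLast = [] := by
      have : (sp s.toList).tail.dropLast.length = 0 := by
        simp [List.length_dropLast, List.length_tail]
        omega
      exact List.length_eq_zero_iff.mp this
    simp [hnil, PySem.Str.len]
  · rw [if_neg h3]
    rcases hint : (sp s.toList).tail.dropLast with _ | ⟨q, r⟩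
    · exfalso
      have : (sp s.toList).tail.dropLast.length = 0 := by rw [hint]; rfl
      simp [List.length_dropLast, List.length_tail] at this
      omega
    · have hq : q ∈ sp s.toList :=
        List.mem_of_mem_tail (List.mem_of_mem_dropLast (hint ▸ List.mem_cons_self))
      have hle : q.length ≤ ((sp s.toList).map List.length).sum :=
        List.single_le_sum (fun x _ => Nat.zero_le x) q.length (List.mem_map_of_mem hq)
      have hsum := sp_length_sum s.toList
      have hbound : (q.length : Int) + 1 ≤ (s.toList.length : Int) - 1 := by omega
      rw [List.map_cons, List.foldl_cons, min_eq_right hbound]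
      rw [show (r.map fun p => ((p.length : Int) + 1)) = (r.map fun p => ((p.length : Int))).map (fun x => x + 1) from by
        simp [List.map_map]]
      rw [foldl_min_map_add_one]
      rw [show (((q :: r).map fun p => ((p.length : Int))).min?) = some (List.foldl min (q.length : Int) (r.map fun p => ((p.length : Int)))) from rfl]
      ring
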